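-- pv_equiv track=rewrite | github.com/rengosv3/skynet | strategies.py | _hybrid_base
-- ===== SOURCE A (Python) =====
-- from collections import Counter
--
-- def _frequency_base(draws, recent_n=30):
--     counters = [Counter() for _ in range(4)]
--     recent = draws[-recent_n:]
--     for d in recent:
--         for num in d['numbers']:
--             for i, digit in enumerate(num):
--                 counters[i][digit] += 1
--     return [[d for d, _ in c.most_common(5)] for c in counters]
--
-- def _polarity_shift_base(draws, recent_n=30):
--     recent = draws[-recent_n:]
--     past = draws[-2*recent_n:-recent_n] if len(draws) >= 2*recent_n else draws[: -recent_n]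
--     rec_counters = [Counter() for _ in range(4)]
--     past_counters = [Counter() for _ in range(4)]
--     for d in recent:
--         for num in d['numbers']:
--             for i, digit in enumerate(num):
--                 rec_counters[i][digit] += 1
--     for d in past:
--         for num in d['numbers']:
--             for i, digit in enumerate(num):
--                 past_counters[i][digit] += 1
--     bases = []
--     for pos in range(4):
--         delta = {digit: rec_counters[pos][digit] - past_counters[pos][digit]
--                  for digit in map(str, range(10))}
--         top5 = sorted(delta, key=lambda x: -delta[x])[:5]
--         bases.append(top5)
--     return bases
--
-- def _hybrid_base(draws, recent_n=30):
--     f = _frequency_base(draws, recent_n)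
--     p = _polarity_shift_base(draws, recent_n)
--     combined = []
--     for pos in range(4):
--         cnt = Counter(f[pos] + p[pos])
--         combined.append([d for d, _ in cnt.most_common(5)])
--     return combined
-- ===== SOURCE B (Python) =====
-- def _hybrid_base(draws, recent_n=30):
--     # Same windows as A, but no Counter and no sorting: top-5 lists are produced by
--     # repeated stable argmax extraction (max + remove), and the final combination
--     # scores each candidate by membership instead of counting a concatenation.
--     recent = draws[-recent_n:]
--     past = draws[-2*recent_n:-recent_n] if len(draws) >= 2*recent_n else draws[:-recent_n]
--
--     def tally(window):
--         t = [{}, {}, {}, {}]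
--         for d in window:
--             for num in d['numbers']:
--                 for i, ch in enumerate(num):
--                     t[i][ch] = t[i].get(ch, 0) + 1
--         return t
--
--     rec, pst = tally(recent), tally(past)
--
--     def top5(keys, score):
--         keys = list(keys)
--         out = []
--         while keys and len(out) < 5:
--             best = max(keys, key=score)   # first maximum: same tie-break as a stable sort
--             out.append(best)
--             keys.remove(best)
--         return out
--
--     combined = []
--     for pos in range(4):
--         f = top5(rec[pos], lambda ch: rec[pos][ch])
--         p = top5([str(g) for g in range(10)],
--                  lambda g: rec[pos].get(g, 0) - pst[pos].get(g, 0))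
--         seen = f + [g for g in p if g not in f]
--         combined.append(top5(seen, lambda g: (g in f) + (g in p)))
--     return combined
-- ===== Notes on version B (the rewrite author's own statement) =====
-- stated objective: alternative
-- what changed: Removes Counter and all sorting: per-position counts are built once per window into plain dicts, every top-5 list (frequency, polarity, and the final combination) is produced by repeated stable argmax extraction (max with first-max tie-break, then remove), and the combination scores candidates by membership in the two lists instead of sorting a Counter of their concatenation.
import Mathlib
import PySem

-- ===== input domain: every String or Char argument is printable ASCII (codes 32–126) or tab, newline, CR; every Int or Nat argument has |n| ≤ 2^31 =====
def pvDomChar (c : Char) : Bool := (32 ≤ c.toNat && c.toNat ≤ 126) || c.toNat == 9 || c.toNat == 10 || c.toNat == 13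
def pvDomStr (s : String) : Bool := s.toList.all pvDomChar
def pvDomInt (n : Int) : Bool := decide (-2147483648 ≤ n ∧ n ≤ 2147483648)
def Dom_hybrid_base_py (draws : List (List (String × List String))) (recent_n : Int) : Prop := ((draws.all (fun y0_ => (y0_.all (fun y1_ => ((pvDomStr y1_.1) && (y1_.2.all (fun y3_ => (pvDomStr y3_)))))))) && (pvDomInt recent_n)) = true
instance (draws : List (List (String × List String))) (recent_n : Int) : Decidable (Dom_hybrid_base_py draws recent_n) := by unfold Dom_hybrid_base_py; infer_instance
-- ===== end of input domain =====

-- B drops Counter and sorting entirely: plain per-position count dicts, every top-5 list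
-- produced by repeated stable argmax extraction (max + remove), and the final combination
-- scored by membership in the two lists; objective: alternative.

-- ===== PORT A =====
-- the past window 'draws[-2*recent_n:-recent_n] if len(draws) >= 2*recent_n else draws[: -recent_n]'
def pvPastWindow (draws : List (List (String × List String))) (recent_n : Int) :
    List (List (String × List String)) :=
  if (draws.length : Int) ≥ 2 * recent_n then
    PySem.List.slice draws (some (-(2 * recent_n))) (some (-recent_n))
  else
    PySem.List.slice draws none (some (-recent_n))

-- the nested counting loops of _frequency_base/_polarity_shift_base: 4 per-position Counters
def pvCountWindow (window : List (List (String × List String))) : List (PySem.Dict Char Int) :=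
  window.foldl
    (fun cs d =>
      ((PySem.Dict.mk d).getD "numbers" []).foldl
        (fun cs num =>
          (PySem.List.enumerate num.toList).foldl
            (fun cs q => cs.modify q.1.toNat (fun c => c.modify q.2 0 (· + 1))) cs)
        cs)
    [PySem.Dict.empty, PySem.Dict.empty, PySem.Dict.empty, PySem.Dict.empty]

-- _frequency_base
def pvFrequencyBase (draws : List (List (String × List String))) (recent_n : Int) : List (List Char) :=
  (pvCountWindow (PySem.List.slice draws (some (-recent_n)) none)).map
    (fun c => ((PySem.List.sorted c.items (fun q => q.2) true).take 5).map (fun q => q.1))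

-- _polarity_shift_base
def pvPolarityBase (draws : List (List (String × List String))) (recent_n : Int) : List (List Char) :=
  let recC := pvCountWindow (PySem.List.slice draws (some (-recent_n)) none)
  let pastC := pvCountWindow (pvPastWindow draws recent_n)
  (List.range 4).map (fun pos =>
    let delta := ("0123456789".toList).foldl
      (fun dd dg => dd.insert dg
        ((recC.getD pos PySem.Dict.empty).getD dg 0 - (pastC.getD pos PySem.Dict.empty).getD dg 0))
      PySem.Dict.empty
    (PySem.List.sorted delta.keys (fun x => -(delta.getD x 0)) false).take 5)

def hybrid_base_py (draws : List (List (String × List String))) (recent_n : Int) : List (List String) :=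
  let f := pvFrequencyBase draws recent_n
  let p := pvPolarityBase draws recent_n
  (List.range 4).map (fun pos =>
    let cnt := PySem.Dict.counter (f.getD pos [] ++ p.getD pos [])
    ((PySem.List.sorted cnt.items (fun q => q.2) true).take 5).map (fun q => String.ofList [q.1]))

-- ===== PORT B =====
-- tally(window): one counting pass into a list of 4 plain dicts, 't[i][ch] = t[i].get(ch, 0) + 1'
def pvTally (window : List (List (String × List String))) : List (PySem.Dict Char Int) :=
  window.foldl
    (fun t d =>
      ((PySem.Dict.mk d).getD "numbers" []).foldl
        (fun t num =>
          (PySem.List.enumerate num.toList).foldl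
            (fun t q => t.modify q.1.toNat (fun m => m.insert q.2 (m.getD q.2 0 + 1))) t)
        t)
    [PySem.Dict.empty, PySem.Dict.empty, PySem.Dict.empty, PySem.Dict.empty]

-- top5's 'while keys and len(out) < 5' loop: the fuel argument is 5 - len(out);
-- 'max(keys, key=score)' is PySem.List.max? (first maximum), and 'keys.remove(best)' is
-- keys.erase best (exact here since best ∈ keys: PySem.List.remove?_eq_some_erase)
def pvTop5Go (score : Char → Int) : Nat → List Char → List Char
  | 0, _ => []
  | k + 1, keys =>
    match PySem.List.max? keys score with
    | none => []
    | some best => best :: pvTop5Go score k (keys.erase best)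

def pvTop5 (keys : List Char) (score : Char → Int) : List Char := pvTop5Go score 5 keys

def hybrid_base_py_alt (draws : List (List (String × List String))) (recent_n : Int) : List (List String) :=
  let recent := PySem.List.slice draws (some (-recent_n)) none
  let past := if (draws.length : Int) ≥ 2 * recent_n then
      PySem.List.slice draws (some (-(2 * recent_n))) (some (-recent_n))
    else PySem.List.slice draws none (some (-recent_n))
  let recT := pvTally recent
  let pstT := pvTally past
  (List.range 4).map (fun pos =>
    let recP := recT.getD pos PySem.Dict.empty
    let pstP := pstT.getD pos PySem.Dict.empty
    let f := pvTop5 recP.keys (fun ch => recP.getD ch 0)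
    let p := pvTop5 ("0123456789".toList) (fun g => recP.getD g 0 - pstP.getD g 0)
    let seen := f ++ p.filter (fun g => !decide (g ∈ f))
    (pvTop5 seen (fun g => (if g ∈ f then (1 : Int) else 0) + (if g ∈ p then 1 else 0))).map
      (fun ch => String.ofList [ch]))

-- ===== PRECONDITION & SPEC =====
-- Pre_ excludes exactly the inputs on which Python A raises: a draw in the recent or past
-- window without the key 'numbers' (KeyError), or a number string longer than 4 characters
-- in those windows (IndexError on counters[i]).
def Pre_hybrid_base_py (draws : List (List (String × List String))) (recent_n : Int) : Prop :=
  ∀ d ∈ PySem.List.slice draws (some (-recent_n)) none ++ pvPastWindow draws recent_n,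
    (PySem.Dict.mk d).contains "numbers" = true ∧
    ∀ num ∈ (PySem.Dict.mk d).getD "numbers" [], num.toList.length ≤ 4

instance (draws : List (List (String × List String))) (recent_n : Int) :
    Decidable (Pre_hybrid_base_py draws recent_n) := by unfold Pre_hybrid_base_py; infer_instance

def pvWitness_hybrid_base_py : (List (List (String × List String))) × Int :=
  ([[("numbers", ["12", "3456"])], [("numbers", ["78"])]], 1)

def Spec_hybrid_base_py (draws : List (List (String × List String))) (recent_n : Int)
    (out : List (List String)) : Prop := out = hybrid_base_py_alt draws recent_n
instance (draws : List (List (String × List String))) (recent_n : Int) (out : List (List String)) :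
    Decidable (Spec_hybrid_base_py draws recent_n out) := by unfold Spec_hybrid_base_py; infer_instance

-- ===== CLAIM (what is proved, stated in full; the proofs are below) =====
def Claim_equal_hybrid_base_py : Prop := ∀ (draws : List (List (String × List String))) (recent_n : Int), Dom_hybrid_base_py draws recent_n → Pre_hybrid_base_py draws recent_n → Spec_hybrid_base_py draws recent_n (hybrid_base_py draws recent_n)

-- ===== LEMMAS AND PROOFS =====

-- the flattened (position, digit) stream of a window, and its per-position selection
def pvStream (w : List (List (String × List String))) : List (Int × Char) :=
  w.flatMap (fun d => ((PySem.Dict.mk d).getD "numbers" []).flatMap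
    (fun num => PySem.List.enumerate num.toList))

def pvSel (pos : Int) (s : List (Int × Char)) : List Char :=
  s.filterMap (fun q => if q.1 = pos then some q.2 else none)

lemma pv_tally_eq (w : List (List (String × List String))) : pvTally w = pvCountWindow w := rfl

lemma pv_enumerate_le {α : Type} (xs : List α) (s : Int) :
    ∀ q ∈ PySem.List.enumerate xs s, s ≤ q.1 := by
  induction xs generalizing s with
  | nil => simp [PySem.List.enumerate]
  | cons x t ih =>
    intro q hq
    rw [PySem.List.enumerate_cons, List.mem_cons] at hq
    cases hq with
    | inl h => simp [h]
    | inr h => have := ih (s+1) q h; omega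

lemma pv_stream_nonneg (w : List (List (String × List String))) :
    ∀ q ∈ pvStream w, 0 ≤ q.1 := by
  intro q hq
  simp only [pvStream, List.mem_flatMap] at hq
  obtain ⟨d, _, num, _, hm⟩ := hq
  exact pv_enumerate_le num.toList 0 q hm

lemma pv_countWindow_eq_foldl (w : List (List (String × List String))) :
    pvCountWindow w = (pvStream w).foldl
      (fun cs q => cs.modify q.1.toNat (fun c => c.modify q.2 0 (· + 1)))
      [PySem.Dict.empty, PySem.Dict.empty, PySem.Dict.empty, PySem.Dict.empty] := by
  simp only [pvCountWindow, pvStream, List.foldl_flatMap]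

lemma pv_foldl_step_length (l : List (Int × Char)) (cs : List (PySem.Dict Char Int)) :
    (l.foldl (fun cs q => cs.modify q.1.toNat (fun c => c.modify q.2 0 (· + 1))) cs).length
      = cs.length := by
  induction l generalizing cs with
  | nil => rfl
  | cons q t ih => simp only [List.foldl_cons]; rw [ih]; simp

lemma pv_getD_foldl_step (l : List (Int × Char)) (cs : List (PySem.Dict Char Int)) (pos : Nat)
    (hl : ∀ q ∈ l, 0 ≤ q.1) (hpos : pos < cs.length) :
    (l.foldl (fun cs q => cs.modify q.1.toNat (fun c => c.modify q.2 0 (· + 1))) cs).getD pos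
      PySem.Dict.empty
    = (l.filterMap (fun q => if q.1 = (pos : Int) then some q.2 else none)).foldl
        (fun c ch => c.modify ch 0 (· + 1)) (cs.getD pos PySem.Dict.empty) := by
  induction l generalizing cs with
  | nil => rfl
  | cons q t ih =>
    simp only [List.foldl_cons, List.filterMap_cons]
    by_cases hq : q.1 = (pos : Int)
    · have hqt : q.1.toNat = pos := by omega
      rw [if_pos hq]
      rw [ih _ (fun z hz => hl z (by simp [hz])) (by simpa using hpos)]
      simp only [List.foldl_cons]
      congr 1
      rw [List.getD_eq_getElem?_getD, List.getD_eq_getElem?_getD, hqt,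
        List.getElem?_modify, List.getElem?_eq_getElem hpos]
      simp
    · rw [if_neg hq]
      rw [ih _ (fun z hz => hl z (by simp [hz])) (by simpa using hpos)]
      congr 1
      have : q.1.toNat ≠ pos := by have := hl q (by simp); omega
      rw [List.getD_eq_getElem?_getD, List.getD_eq_getElem?_getD, List.getElem?_modify]
      simp only [if_neg this]
      cases cs[pos]? <;> rfl

lemma pv_countWindow_length (w : List (List (String × List String))) :
    (pvCountWindow w).length = 4 := by
  rw [pv_countWindow_eq_foldl, pv_foldl_step_length]; rfl

lemma pv_countWindow_getD (w : List (List (String × List String))) (pos : Nat) (hpos : pos < 4) :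
    (pvCountWindow w).getD pos PySem.Dict.empty
      = PySem.Dict.counter (pvSel (pos : Int) (pvStream w)) := by
  rw [pv_countWindow_eq_foldl,
    pv_getD_foldl_step _ _ _ (pv_stream_nonneg w) (by simpa using hpos)]
  rw [PySem.Dict.counter_eq_foldl]
  congr 1
  interval_cases pos <;> rfl

-- max over an append: the first maximum of t ++ [x]
lemma pv_max?_append {α : Type} (key : α → Int) (t : List α) (x : α) :
    PySem.List.max? (t ++ [x]) key
      = match PySem.List.max? t key with
        | none => some x
        | some mt => if key mt < key x then some x else some mt := by
  simp only [PySem.List.max?, List.foldl_append, List.foldl_cons, List.foldl_nil]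
  rfl

lemma pv_sorted_rev_append_singleton {α : Type} (key : α → Int) (t : List α) (x : α) :
    PySem.List.sorted (t ++ [x]) key true
      = PySem.List.insertBy (fun a b => decide (key b < key a)) x
          (PySem.List.sorted t key true) := by
  rw [PySem.List.sorted_rev_eq_foldl_insertBy, PySem.List.sorted_rev_eq_foldl_insertBy,
    List.foldl_append, List.foldl_cons, List.foldl_nil]

-- the stable descending sort starts with the FIRST maximum, and the tail is the
-- stable descending sort of the list with that occurrence removed
lemma pv_sorted_rev_extract {α : Type} [DecidableEq α] (key : α → Int) (l : List α) (m : α)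
    (h : PySem.List.max? l key = some m) :
    PySem.List.sorted l key true = m :: PySem.List.sorted (l.erase m) key true := by
  induction l using List.reverseRecOn with
  | nil => simp [PySem.List.max?] at h
  | append_singleton t x ih =>
    rw [pv_max?_append] at h
    cases ht : PySem.List.max? t key with
    | none =>
      have htnil : t = [] := (PySem.List.max?_eq_none_iff t key).1 ht
      rw [ht] at h
      simp only [Option.some.injEq] at h
      subst htnil
      simp only [List.nil_append] at *
      subst h
      simp [PySem.List.sorted, PySem.List.insertBy]
    | some mt =>
      rw [ht] at h
      simp only at h
      by_cases hlt : key mt < key x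
      · -- x is a new strict maximum: it goes to the front, and x ∉ t
        rw [if_pos hlt] at h
        have hxm : x = m := by simpa using h
        subst hxm
        have hmax := PySem.List.max?_isMax ht
        have hxnott : x ∉ t := by
          intro hx
          have := hmax x hx
          omega
        rw [pv_sorted_rev_append_singleton]
        have hins : PySem.List.insertBy (fun a b => decide (key b < key a)) x
            (PySem.List.sorted t key true) = x :: PySem.List.sorted t key true := by
          cases hs : PySem.List.sorted t key true with
          | nil => rfl
          | cons h0 t0 =>
            have hh0 : h0 ∈ t := by
              rw [← PySem.List.mem_sorted t key true h0, hs]; simp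
            have : key h0 < key x := by have := hmax h0 hh0; omega
            simp [PySem.List.insertBy, this]
        rw [hins]
        congr 1
        rw [List.erase_append, if_neg hxnott]
        simp
      · -- the first maximum stays the first maximum of t
        rw [if_neg hlt] at h
        have hmtm : mt = m := by simpa using h
        subst hmtm
        have hmt : mt ∈ t := PySem.List.max?_mem ht
        rw [pv_sorted_rev_append_singleton, ih ht]
        have hbef : (decide (key mt < key x)) = false := by
          simp only [decide_eq_false_iff_not]; omega
        simp only [PySem.List.insertBy, hbef, Bool.false_eq_true, if_false]
        rw [← pv_sorted_rev_append_singleton]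
        congr 1
        rw [List.erase_append, if_pos hmt]

-- the extraction loop IS take k of the stable descending sort
lemma pv_top5Go_eq (score : Char → Int) (k : Nat) (l : List Char) :
    pvTop5Go score k l = (PySem.List.sorted l score true).take k := by
  induction k generalizing l with
  | zero => simp [pvTop5Go]
  | succ k ih =>
    cases hm : PySem.List.max? l score with
    | none =>
      have : l = [] := (PySem.List.max?_eq_none_iff l score).1 hm
      subst this
      simp [pvTop5Go, PySem.List.max?, PySem.List.sorted]
    | some m =>
      simp only [pvTop5Go, hm]
      rw [pv_sorted_rev_extract score l m hm, List.take_succ_cons, ih]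

lemma pv_top5_eq (l : List Char) (score : Char → Int) :
    pvTop5 l score = (PySem.List.sorted l score true).take 5 :=
  pv_top5Go_eq score 5 l

-- map fst commutes with the descending sort when the key agrees through fst
lemma pv_map_insertBy (score : Char → Int) (q : Char × Int) (acc : List (Char × Int))
    (hq : score q.1 = q.2) (hacc : ∀ r ∈ acc, score r.1 = r.2) :
    (PySem.List.insertBy (fun a b : Char × Int => decide (b.2 < a.2)) q acc).map (fun r => r.1)
      = PySem.List.insertBy (fun a b : Char => decide (score b < score a)) q.1
          (acc.map (fun r => r.1)) := by
  induction acc with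
  | nil => rfl
  | cons r t ih =>
    have hr : score r.1 = r.2 := hacc r (by simp)
    by_cases hb : r.2 < q.2
    · simp [PySem.List.insertBy, hr, hq, hb]
    · have h1 : decide (r.2 < q.2) = false := by simpa using hb
      have h2 : decide (score r.1 < score q.1) = false := by rw [hr, hq]; exact h1
      simp only [PySem.List.insertBy, List.map_cons, h1, h2, Bool.false_eq_true, if_false]
      rw [ih (fun z hz => hacc z (by simp [hz]))]

lemma pv_sorted_rev_map_fst (l : List (Char × Int)) (score : Char → Int)
    (h : ∀ q ∈ l, score q.1 = q.2) :
    (PySem.List.sorted l (fun q => q.2) true).map (fun q => q.1)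
      = PySem.List.sorted (l.map (fun q => q.1)) score true := by
  rw [PySem.List.sorted_rev_eq_foldl_insertBy, PySem.List.sorted_rev_eq_foldl_insertBy]
  have aux : ∀ (l' : List (Char × Int)) (acc : List (Char × Int)),
      (∀ q ∈ l', score q.1 = q.2) → (∀ q ∈ acc, score q.1 = q.2) →
      ((l'.foldl (fun a q => PySem.List.insertBy (fun a b : Char × Int => decide (b.2 < a.2)) q a) acc).map (fun r => r.1))
        = (l'.map (fun r => r.1)).foldl
            (fun a x => PySem.List.insertBy (fun a b : Char => decide (score b < score a)) x a)
            (acc.map (fun r => r.1)) := by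
    intro l'
    induction l' with
    | nil => intro acc _ _; rfl
    | cons q t ih =>
      intro acc hl hacc
      simp only [List.foldl_cons, List.map_cons]
      rw [← pv_map_insertBy score q acc (hl q (by simp)) hacc]
      exact ih _ (fun z hz => hl z (by simp [hz]))
        (fun z hz => by
          rcases (PySem.List.mem_insertBy _ q z acc).1 hz with rfl | hz'
          · exact hl z (by simp)
          · exact hacc z hz')
  exact aux l [] h (by simp)

-- reverse=True with key δ is the ascending sort with key -δ (same before-function)
lemma pv_sorted_rev_eq_neg {α : Type} (l : List α) (key : α → Int) :
    PySem.List.sorted l key true = PySem.List.sorted l (fun x => -(key x)) false := by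
  rw [PySem.List.sorted_rev_eq_foldl_insertBy, PySem.List.sorted_eq_foldl_insertBy]
  have : (fun a b : α => decide (key b < key a)) = (fun a b : α => decide (-(key a) < -(key b))) := by
    funext a b
    rw [decide_eq_decide]
    omega
  rw [this]

lemma pv_update_eq (p : List Char) (s : PySem.Set Char) (hp : p.Nodup) :
    s.update p = s ++ p.filter (fun x => !decide (x ∈ s)) := by
  induction p generalizing s with
  | nil => simp [PySem.Set.update]
  | cons x t ih =>
    have hxt : x ∉ t := by simp_all
    have hupd : s.update (x :: t) = (s.add x).update t := by
      simp [PySem.Set.update]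
    rw [hupd, ih _ (by simp_all)]
    simp only [PySem.Set.add]
    by_cases hm : x ∈ s
    · have hc : s.contains x = true := by simpa using hm
      simp [hm]
    · have hc : s.contains x = false := by simpa using hm
      simp [hm]
      apply List.filter_congr
      intro y hy
      have hyx : y ≠ x := fun h => hxt (h ▸ hy)
      simp [hyx]

lemma pv_insertBy_congr {α : Type} (b1 b2 : α → α → Bool) (x : α) (ys : List α)
    (h : ∀ y ∈ ys, b1 x y = b2 x y) :
    PySem.List.insertBy b1 x ys = PySem.List.insertBy b2 x ys := by
  induction ys with
  | nil => rfl
  | cons y t ih =>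
    simp only [PySem.List.insertBy]
    rw [h y (by simp)]
    by_cases hb : b2 x y
    · simp [hb]
    · have hb' : b2 x y = false := by simpa using hb
      rw [hb']
      simp only [Bool.false_eq_true, if_false]
      rw [ih (fun z hz => h z (by simp [hz]))]

lemma pv_insertBy_append_left {α : Type} (b : α → α → Bool) (x : α) (as bs : List α)
    (h : ∀ a ∈ as, b x a = false) :
    PySem.List.insertBy b x (as ++ bs) = as ++ PySem.List.insertBy b x bs := by
  induction as with
  | nil => simp
  | cons a t ih =>
    simp only [List.cons_append, PySem.List.insertBy]
    rw [h a (by simp)]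
    simp only [Bool.false_eq_true, if_false]
    rw [ih (fun z hz => h z (by simp [hz]))]

lemma pv_sorted_congr {α κ : Type} [LT κ] [DecidableLT κ] (xs : List α) (k1 k2 : α → κ)
    (h : ∀ x ∈ xs, k1 x = k2 x) :
    PySem.List.sorted xs k1 false = PySem.List.sorted xs k2 false := by
  rw [PySem.List.sorted_eq_foldl_insertBy, PySem.List.sorted_eq_foldl_insertBy]
  have aux : ∀ (l acc : List α), (∀ x ∈ l, k1 x = k2 x) → (∀ y ∈ acc, k1 y = k2 y) →
      l.foldl (fun acc x => PySem.List.insertBy (fun a b => decide (k1 a < k1 b)) x acc) acc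
      = l.foldl (fun acc x => PySem.List.insertBy (fun a b => decide (k2 a < k2 b)) x acc) acc := by
    intro l
    induction l with
    | nil => intro acc _ _; rfl
    | cons x t ih =>
      intro acc hl hacc
      simp only [List.foldl_cons]
      rw [pv_insertBy_congr _ (fun a b => decide (k2 a < k2 b)) x acc
          (fun y hy => by rw [hl x (by simp), hacc y hy])]
      exact ih _ (fun z hz => hl z (by simp [hz]))
        (fun y hy => by
          rcases (PySem.List.mem_insertBy _ x y acc).1 hy with rfl | hy'
          · exact hl y (by simp)
          · exact hacc y hy')
  exact aux xs [] h (by simp)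

lemma pv_sorted_rev_binary {α : Type} (key : α → Int) (l : List α) (a b : Int) (hba : b < a)
    (h : ∀ x ∈ l, key x = a ∨ key x = b) :
    PySem.List.sorted l key true
      = l.filter (fun x => decide (key x = a)) ++ l.filter (fun x => !decide (key x = a)) := by
  rw [PySem.List.sorted_rev_eq_foldl_insertBy]
  induction l using List.reverseRecOn with
  | nil => rfl
  | append_singleton t x ih =>
    have ht : ∀ y ∈ t, key y = a ∨ key y = b := fun y hy => h y (by simp [hy])
    rw [List.foldl_append, List.foldl_cons, List.foldl_nil, ih ht]
    have hFa : ∀ y ∈ t.filter (fun x => decide (key x = a)), key y = a := by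
      intro y hy; have := List.of_mem_filter hy; simpa using this
    have hGb : ∀ y ∈ t.filter (fun x => !decide (key x = a)), key y = b := by
      intro y hy
      have hm := List.mem_of_mem_filter hy
      have := List.of_mem_filter hy
      rcases ht y hm with h1 | h1
      · simp [h1] at this
      · exact h1
    rcases h x (by simp) with hx | hx
    · -- key x = a : goes after the a-block, in front of the b-block
      rw [pv_insertBy_append_left _ x _ _ (fun y hy => by
            simp [hFa y hy, hx])]
      have hins : PySem.List.insertBy (fun p q => decide (key q < key p)) x
          (t.filter (fun x => !decide (key x = a))) = x :: t.filter (fun x => !decide (key x = a)) := by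
        cases hG : t.filter (fun x => !decide (key x = a)) with
        | nil => rfl
        | cons g G =>
          have hg : key g = b := hGb g (by rw [hG]; simp)
          simp only [PySem.List.insertBy]
          simp [hx, hg, hba]
      rw [hins]
      simp [List.filter_append, hx]
    · -- key x = b : appended at the very end
      rw [PySem.List.insertBy_of_forall_not_before _ x _ (fun y hy => by
            rcases List.mem_append.1 hy with hy' | hy'
            · simp [hFa y hy', hx]; omega
            · simp [hGb y hy', hx])]
      have hxa : key x ≠ a := by omega
      simp [List.filter_append, hxa, List.append_assoc]

lemma pv_getD_map {α β : Type} (l : List α) (g : α → β) (pos : Nat) (d1 : β) (d2 : α)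
    (h : pos < l.length) :
    (l.map g).getD pos d1 = g (l.getD pos d2) := by
  rw [List.getD_eq_getElem?_getD, List.getD_eq_getElem?_getD, List.getElem?_map,
    List.getElem?_eq_getElem h]
  rfl

lemma pv_delta_items (digits : List Char) (hd : digits.Nodup) (v : Char → Int) :
    (digits.foldl (fun dd dg => dd.insert dg (v dg)) PySem.Dict.empty).items
      = digits.map (fun dg => (dg, v dg)) := by
  have := PySem.Dict.items_foldl_insert_fresh digits (fun a => a) v PySem.Dict.empty
    (fun a _ => by simp [PySem.Dict.contains_empty]) (by simpa using hd)
  simpa using this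

lemma pv_delta_keys (digits : List Char) (hd : digits.Nodup) (v : Char → Int) :
    (digits.foldl (fun dd dg => dd.insert dg (v dg)) PySem.Dict.empty).keys = digits := by
  have h := pv_delta_items digits hd v
  simp only [PySem.Dict.keys, h]
  simp [Function.comp_def]

lemma pv_delta_getD (digits : List Char) (hd : digits.Nodup) (v : Char → Int) (dg : Char)
    (hdg : dg ∈ digits) :
    (digits.foldl (fun dd dg => dd.insert dg (v dg)) PySem.Dict.empty).getD dg 0 = v dg := by
  apply PySem.Dict.getD_of_mem_items
  · rw [pv_delta_items digits hd v]
    exact List.mem_map.2 ⟨dg, hdg, rfl⟩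
  · rw [pv_delta_keys digits hd v]
    exact hd

-- A's Counter(f + p).most_common: the keys with count 2 (in f's order), then the rest stably
lemma pv_combine (f p : List Char) (hf : f.Nodup) (hp : p.Nodup) :
    (PySem.List.sorted (PySem.Dict.counter (f ++ p)).items (fun q => q.2) true).map (fun q => q.1)
      = f.filter (fun g => decide (g ∈ p)) ++ f.filter (fun g => !decide (g ∈ p)) ++
        p.filter (fun g => !decide (g ∈ f)) := by
  have hof : PySem.Set.ofList (f ++ p) = f ++ p.filter (fun x => !decide (x ∈ f)) := by
    rw [PySem.Set.ofList_append, PySem.Set.ofList_eq_self_of_nodup f hf, pv_update_eq p f hp]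
  rw [PySem.Dict.items_counter, hof, List.map_append]
  set κ : Char → Char × Int := fun k => (k, (List.count k (f ++ p) : Int)) with hκ
  have hcntf : ∀ k ∈ f, (List.count k (f ++ p) : Int) = if k ∈ p then 2 else 1 := by
    intro k hk
    rw [List.count_append, List.count_eq_one_of_mem hf hk]
    by_cases hkp : k ∈ p
    · rw [List.count_eq_one_of_mem hp hkp, if_pos hkp]; norm_num
    · rw [List.count_eq_zero.2 hkp]; simp [hkp]
  have hcntp : ∀ k ∈ p.filter (fun x => !decide (x ∈ f)), (List.count k (f ++ p) : Int) = 1 := by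
    intro k hk
    have hkp : k ∈ p := List.mem_of_mem_filter hk
    have hkf : k ∉ f := by have := List.of_mem_filter hk; simpa using this
    rw [List.count_append, List.count_eq_zero.2 hkf, List.count_eq_one_of_mem hp hkp]
    norm_num
  have h2 : ∀ x ∈ f.map κ ++ (p.filter (fun x => !decide (x ∈ f))).map κ,
      (fun q : Char × Int => q.2) x = 2 ∨ (fun q : Char × Int => q.2) x = 1 := by
    intro x hx
    rcases List.mem_append.1 hx with hx | hx
    · obtain ⟨k, hk, rfl⟩ := List.mem_map.1 hx
      have := hcntf k hk
      by_cases hkp : k ∈ p <;> simp_all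
    · obtain ⟨k, hk, rfl⟩ := List.mem_map.1 hx
      have := hcntp k hk
      simp_all
  rw [pv_sorted_rev_binary _ _ 2 1 (by norm_num) h2]
  rw [List.filter_append, List.filter_append, List.map_append, List.map_append,
    List.map_append]
  have e1 : ((f.map κ).filter (fun x => decide (x.2 = 2))).map (fun q => q.1)
      = f.filter (fun g => decide (g ∈ p)) := by
    rw [List.filter_map, List.map_map]
    have : List.filter ((fun x : Char × Int => decide (x.2 = 2)) ∘ κ) f
        = List.filter (fun g => decide (g ∈ p)) f := by
      apply List.filter_congr
      intro k hk
      have := hcntf k hk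
      by_cases hkp : k ∈ p <;> simp_all
    rw [this]; simp [Function.comp_def, hκ]
  have e2 : ((f.map κ).filter (fun x => !decide (x.2 = 2))).map (fun q => q.1)
      = f.filter (fun g => !decide (g ∈ p)) := by
    rw [List.filter_map, List.map_map]
    have : List.filter ((fun x : Char × Int => !decide (x.2 = 2)) ∘ κ) f
        = List.filter (fun g => !decide (g ∈ p)) f := by
      apply List.filter_congr
      intro k hk
      have := hcntf k hk
      by_cases hkp : k ∈ p <;> simp_all
    rw [this]; simp [Function.comp_def, hκ]
  have e3 : (((p.filter (fun x => !decide (x ∈ f))).map κ).filter (fun x => decide (x.2 = 2))).map (fun q => q.1)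
      = [] := by
    rw [List.filter_map]
    have : List.filter ((fun x : Char × Int => decide (x.2 = 2)) ∘ κ) (p.filter (fun x => !decide (x ∈ f)))
        = [] := by
      rw [List.filter_eq_nil_iff]
      intro k hk
      have := hcntp k hk
      simp_all
    rw [this]; rfl
  have e4 : (((p.filter (fun x => !decide (x ∈ f))).map κ).filter (fun x => !decide (x.2 = 2))).map (fun q => q.1)
      = p.filter (fun x => !decide (x ∈ f)) := by
    rw [List.filter_map, List.map_map]
    have : List.filter ((fun x : Char × Int => !decide (x.2 = 2)) ∘ κ) (p.filter (fun x => !decide (x ∈ f)))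
        = p.filter (fun x => !decide (x ∈ f)) := by
      apply List.filter_eq_self.2
      intro k hk
      have := hcntp k hk
      simp_all
    rw [this]; simp [Function.comp_def, hκ]
  rw [e1, e2, e3, e4]
  simp

-- B's membership-scored extraction over seen = f ++ (p \ f) gives the same three blocks
lemma pv_combine_alt (f p : List Char) :
    PySem.List.sorted (f ++ p.filter (fun g => !decide (g ∈ f)))
      (fun g => (if g ∈ f then (1 : Int) else 0) + (if g ∈ p then 1 else 0)) true
      = f.filter (fun g => decide (g ∈ p)) ++ f.filter (fun g => !decide (g ∈ p)) ++
        p.filter (fun g => !decide (g ∈ f)) := by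
  set score : Char → Int := fun g => (if g ∈ f then (1 : Int) else 0) + (if g ∈ p then 1 else 0)
    with hscore
  have h2 : ∀ x ∈ f ++ p.filter (fun g => !decide (g ∈ f)), score x = 2 ∨ score x = 1 := by
    intro x hx
    rcases List.mem_append.1 hx with hx | hx
    · by_cases hxp : x ∈ p <;> simp [hscore, hx, hxp]
    · have hxp : x ∈ p := List.mem_of_mem_filter hx
      have hxf : x ∉ f := by have := List.of_mem_filter hx; simpa using this
      simp [hscore, hxp, hxf]
  rw [pv_sorted_rev_binary score _ 2 1 (by norm_num) h2, List.filter_append, List.filter_append]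
  have e1 : f.filter (fun x => decide (score x = 2)) = f.filter (fun g => decide (g ∈ p)) := by
    apply List.filter_congr
    intro k hk
    by_cases hkp : k ∈ p <;> simp [hscore, hk, hkp]
  have e2 : (p.filter (fun g => !decide (g ∈ f))).filter (fun x => decide (score x = 2)) = [] := by
    rw [List.filter_eq_nil_iff]
    intro k hk
    have hkp : k ∈ p := List.mem_of_mem_filter hk
    have hkf : k ∉ f := by have := List.of_mem_filter hk; simpa using this
    simp [hscore, hkp, hkf]
  have e3 : f.filter (fun x => !decide (score x = 2)) = f.filter (fun g => !decide (g ∈ p)) := by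
    apply List.filter_congr
    intro k hk
    by_cases hkp : k ∈ p <;> simp [hscore, hk, hkp]
  have e4 : (p.filter (fun g => !decide (g ∈ f))).filter (fun x => !decide (score x = 2))
      = p.filter (fun g => !decide (g ∈ f)) := by
    apply List.filter_eq_self.2
    intro k hk
    have hkp : k ∈ p := List.mem_of_mem_filter hk
    have hkf : k ∉ f := by have := List.of_mem_filter hk; simpa using this
    simp [hscore, hkp, hkf]
  rw [e1, e2, e3, e4]
  simp

lemma pv_take_sorted_nodup {α κ : Type} [LT κ] [DecidableLT κ] (l : List α) (key : α → κ)
    (rev : Bool) (n : Nat) (h : l.Nodup) :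
    ((PySem.List.sorted l key rev).take n).Nodup := by
  have hperm : (PySem.List.sorted l key rev).Perm l := PySem.List.sorted_perm _ _ _
  exact (List.take_sublist n _).nodup (hperm.nodup_iff.2 h)

set_option maxHeartbeats 2000000 in
theorem hybrid_base_py_spec : Claim_equal_hybrid_base_py := by
  intro draws rn _ _
  unfold Spec_hybrid_base_py
  simp only [hybrid_base_py, hybrid_base_py_alt, pvFrequencyBase, pvPolarityBase]
  rw [show (if (draws.length : Int) ≥ 2 * rn then
      PySem.List.slice draws (some (-(2 * rn))) (some (-rn))
    else PySem.List.slice draws none (some (-rn))) = pvPastWindow draws rn from rfl]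
  apply List.map_congr_left
  intro pos hpos
  have hpos4 : pos < 4 := List.mem_range.1 hpos
  have hdig : ("0123456789".toList).Nodup := by decide
  set C := (pvTally (PySem.List.slice draws (some (-rn)) none)).getD pos PySem.Dict.empty
    with hC
  set P := (pvTally (pvPastWindow draws rn)).getD pos PySem.Dict.empty with hP
  have hCcounter : C = PySem.Dict.counter
      (pvSel (pos : Int) (pvStream (PySem.List.slice draws (some (-rn)) none))) := by
    rw [hC, pv_tally_eq]
    exact pv_countWindow_getD _ pos hpos4
  have hCkeysnd : C.keys.Nodup := by
    rw [hCcounter]; exact PySem.Dict.nodup_keys_counter _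
  -- the frequency list: A's most_common over items equals B's extraction over keys
  have hagree : ∀ q ∈ C.items, (fun ch => C.getD ch 0) q.1 = q.2 := by
    rintro ⟨k, v⟩ hq
    exact PySem.Dict.getD_of_mem_items C hq hCkeysnd 0
  have hfA : ((pvCountWindow (PySem.List.slice draws (some (-rn)) none)).map
      (fun c => ((PySem.List.sorted c.items (fun q => q.2) true).take 5).map (fun q => q.1))).getD pos []
      = (PySem.List.sorted C.keys (fun ch => C.getD ch 0) true).take 5 := by
    rw [pv_getD_map _ _ pos [] PySem.Dict.empty (by rw [pv_countWindow_length]; exact hpos4),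
      ← pv_tally_eq, ← hC]
    rw [List.map_take, pv_sorted_rev_map_fst C.items (fun ch => C.getD ch 0) hagree]
    rfl
  have hfB : pvTop5 C.keys (fun ch => C.getD ch 0)
      = (PySem.List.sorted C.keys (fun ch => C.getD ch 0) true).take 5 := pv_top5_eq _ _
  -- the polarity list
  have hpA : (((List.range 4).map (fun pos =>
        (PySem.List.sorted
          (("0123456789".toList).foldl (fun dd dg => dd.insert dg
            (((pvCountWindow (PySem.List.slice draws (some (-rn)) none)).getD pos PySem.Dict.empty).getD dg 0 -
             ((pvCountWindow (pvPastWindow draws rn)).getD pos PySem.Dict.empty).getD dg 0))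
            PySem.Dict.empty).keys
          (fun x => -((("0123456789".toList).foldl (fun dd dg => dd.insert dg
            (((pvCountWindow (PySem.List.slice draws (some (-rn)) none)).getD pos PySem.Dict.empty).getD dg 0 -
             ((pvCountWindow (pvPastWindow draws rn)).getD pos PySem.Dict.empty).getD dg 0))
            PySem.Dict.empty).getD x 0)) false).take 5)).getD pos [])
      = (PySem.List.sorted ("0123456789".toList)
          (fun g => -(C.getD g 0 - P.getD g 0)) false).take 5 := by
    simp only [PySem.List.getD_map_range _ 4 pos [] hpos4]
    rw [pv_delta_keys _ hdig]
    refine congrArg (List.take 5) ?_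
    apply pv_sorted_congr
    intro x hx
    rw [pv_delta_getD _ hdig _ x hx, ← pv_tally_eq, ← pv_tally_eq, ← hC, ← hP]
  have hpB : pvTop5 ("0123456789".toList) (fun g => C.getD g 0 - P.getD g 0)
      = (PySem.List.sorted ("0123456789".toList)
          (fun g => -(C.getD g 0 - P.getD g 0)) false).take 5 := by
    rw [pv_top5_eq, pv_sorted_rev_eq_neg]
  rw [hfA, hpA]
  simp only [hfB, hpB]
  set fL := (PySem.List.sorted C.keys (fun ch => C.getD ch 0) true).take 5 with hfL
  set pL := (PySem.List.sorted ("0123456789".toList)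
      (fun g => -(C.getD g 0 - P.getD g 0)) false).take 5 with hpL
  have hf : fL.Nodup := pv_take_sorted_nodup _ _ _ _ hCkeysnd
  have hp : pL.Nodup := pv_take_sorted_nodup _ _ _ _ hdig
  have hcomp : ∀ (X : List (Char × Int)), X.map (fun q => String.ofList [q.1])
      = (X.map (fun q => q.1)).map (fun ch => String.ofList [ch]) := by
    intro X; rw [List.map_map]; rfl
  rw [pv_top5_eq, pv_combine_alt fL pL, hcomp, List.map_take, pv_combine fL pL hf hp]
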